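-- pv_equiv track=rewrite | github.com/parasiitism/AlgoDaily | glassdoor/hrt/diamond-cipher/main.py | f
-- ===== SOURCE A (Python) =====
-- def f(M):
--     R, C = len(M), len(M[0])  # R = 2*C
--     res = []
--     for j in range(C):
--         row1 = []
--         i = 1
--         while i < R:
--             row1.append(M[i][j])
--             i += 2
--         res.append(row1)
--
--         row2 = []
--         i = 0
--         while i < R:
--             row2.append(M[i][j])
--             i += 2
--         res.append(row2)
--     return res
--
-- M = [
--     ['a', 'b', 'c'],
--     ['d', 'e', 'f'],
--     ['g', 'h', 'i'],
--     ['j', 'k', 'l'],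
--     ['m', 'n', 'o'],
--     ['p', 'q', 'r'],
-- ]
-- ===== SOURCE B (Python) =====
-- def f(M):
--     C = len(M[0])
--     res = []
--     for j in range(C):
--         col = [row[j] for row in M]
--         evens, odds = [], []
--         take_even = True
--         for x in col:
--             if take_even:
--                 evens.append(x)
--             else:
--                 odds.append(x)
--             take_even = not take_even
--         res.append(odds)
--         res.append(evens)
--     return res
-- ===== Notes on version B (the rewrite author's own statement) =====
-- stated objective: alternative
-- what changed: Per column, A runs two stride-2 index while-loops over M[i][j]; B materializes the column once and distributes it into even/odd buckets in a single pass with a parity toggle.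
import Mathlib
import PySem

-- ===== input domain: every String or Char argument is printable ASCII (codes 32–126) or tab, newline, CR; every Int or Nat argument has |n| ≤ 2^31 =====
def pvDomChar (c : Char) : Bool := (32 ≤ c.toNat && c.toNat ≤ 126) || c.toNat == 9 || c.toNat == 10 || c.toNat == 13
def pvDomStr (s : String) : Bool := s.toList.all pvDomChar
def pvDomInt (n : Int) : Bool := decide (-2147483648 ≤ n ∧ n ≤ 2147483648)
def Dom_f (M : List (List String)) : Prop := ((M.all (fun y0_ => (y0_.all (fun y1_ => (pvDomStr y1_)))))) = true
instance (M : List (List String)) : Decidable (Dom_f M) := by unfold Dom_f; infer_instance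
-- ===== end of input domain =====

-- B replaces A's two stride-2 index while-loops per column with one materialize-the-column
-- pass that distributes elements into even/odd buckets via a parity toggle (objective: alternative).

-- ===== PORT A =====
-- the stride-2 while loop `while i < R: row.append(M[i][j]); i += 2`
-- (indices i < R = len M and, under Pre_f, j < len(M[i]) are in range, so pyGetD is exact)
def fColA (M : List (List String)) (j : Int) (i R : Nat) : List String :=
  if i < R then
    PySem.List.pyGetD (PySem.List.pyGetD M (i : Int) []) j "" :: fColA M j (i + 2) R
  else []
termination_by R - i

def f (M : List (List String)) : List (List String) :=
  let R := M.length
  let C := (M.headD []).length   -- len(M[0]); Pre_f guarantees M ≠ []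
  (PySem.List.pyRange 0 (C : Int) 1).foldl
    (fun res j => (res ++ [fColA M j 1 R]) ++ [fColA M j 0 R]) []

-- ===== PORT B =====
-- Source B's inner loop: one pass over the column with a parity toggle filling (evens, odds)
def fSplitB (col : List String) : List String × List String :=
  let r := col.foldl
    (fun (s : List String × List String × Bool) x =>
      if s.2.2 then (s.1 ++ [x], s.2.1, false) else (s.1, s.2.1 ++ [x], true))
    ([], [], true)
  (r.1, r.2.1)

def f_alt (M : List (List String)) : List (List String) :=
  let C := (M.headD []).length   -- len(M[0]); Pre_f guarantees M ≠ []
  (PySem.List.pyRange 0 (C : Int) 1).foldl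
    (fun res j =>
      let col := M.map (fun row => PySem.List.pyGetD row j "")
      let p := fSplitB col
      (res ++ [p.2]) ++ [p.1]) []

-- ===== PRECONDITION & SPEC =====
-- Pre_f excludes exactly the inputs where the Python A raises IndexError (empty M at len(M[0]),
-- or a row shorter than len(M[0]) at M[i][j]); B raises there too.
def Pre_f (M : List (List String)) : Prop :=
  M ≠ [] ∧ ∀ row ∈ M, (M.headD []).length ≤ row.length
instance (M : List (List String)) : Decidable (Pre_f M) := by unfold Pre_f; infer_instance

def pvWitness_f : List (List String) := [["a", "b"], ["c", "d"], ["e", "f"], ["g", "h"]]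

def Spec_f (M : List (List String)) (out : List (List String)) : Prop := out = f_alt M
instance (M : List (List String)) (out : List (List String)) : Decidable (Spec_f M out) := by unfold Spec_f; infer_instance

-- ===== CLAIM (what is proved, stated in full; the proofs are below) =====
def Claim_equal_f : Prop := ∀ (M : List (List String)), Dom_f M → Pre_f M → Spec_f M (f M)

-- ===== LEMMAS AND PROOFS =====

-- parity split of a list: (elements at even positions, elements at odd positions)
def po : List String → List String × List String
  | [] => ([], [])
  | x :: xs => ((x :: (po xs).2), (po xs).1)

theorem po_snd (xs : List String) : (po xs).2 = (po xs.tail).1 := by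
  cases xs <;> simp [po]

theorem fColA_eq_po (M : List (List String)) (j : Int) (i : Nat) :
    fColA M j i M.length = (po ((M.map (fun row => PySem.List.pyGetD row j "")).drop i)).1 := by
  by_cases h : i < M.length
  · rw [fColA]
    simp only [h, if_pos]
    have hc : i < (M.map (fun row => PySem.List.pyGetD row j "")).length := by simpa using h
    rw [List.drop_eq_getElem_cons hc]
    simp only [po]
    have h2 := fColA_eq_po M j (i + 1 + 1)
    rw [show i + 2 = i + 1 + 1 by omega] at *
    rw [h2, po_snd, List.tail_drop]
    congr 1
    simp [PySem.List.pyGetD_natCast, List.getElem?_eq_getElem h]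
  · rw [fColA]
    simp only [h, if_neg, not_false_iff]
    rw [List.drop_eq_nil_of_le (by simpa using not_lt.mp h)]
    simp [po]
termination_by M.length - i

theorem foldl_po (col : List String) : ∀ (e o : List String) (t : Bool),
    col.foldl
      (fun (s : List String × List String × Bool) x =>
        if s.2.2 then (s.1 ++ [x], s.2.1, false) else (s.1, s.2.1 ++ [x], true))
      (e, o, t)
    = if t then (e ++ (po col).1, o ++ (po col).2, (decide (col.length % 2 = 0)))
      else (e ++ (po col).2, o ++ (po col).1, (decide (col.length % 2 = 1))) := by
  induction col with
  | nil => intro e o t; cases t <;> simp [po]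
  | cons x xs ih =>
    intro e o t
    cases t <;> simp only [List.foldl_cons, if_true, Bool.false_eq_true, if_false, ih, po] <;>
      refine Prod.ext (by simp [List.append_assoc]) (Prod.ext (by simp [List.append_assoc]) ?_) <;>
      simp [Nat.succ_mod_two_eq_zero_iff, Nat.succ_mod_two_eq_one_iff]

theorem fSplitB_eq_po (col : List String) : fSplitB col = po col := by
  unfold fSplitB
  rw [foldl_po]
  simp

-- ===== VERDICT (by name: the statement is the Claim_ definition above) =====
theorem f_spec : Claim_equal_f := by
  intro M _ _
  unfold Spec_f f f_alt
  dsimp only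
  congr 1
  funext res j
  have h1 := fColA_eq_po M j 1
  have h0 := fColA_eq_po M j 0
  simp only [fSplitB_eq_po]
  rw [h1, h0]
  simp [List.drop_one, po_snd]
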